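-- pv_equiv track=rewrite | github.com/valdecircarvalho/llmdev.ai.br | apps/cms-api/app/services/markdown.py | _ordered_front_matter
-- ===== SOURCE A (Python) =====
-- from collections import OrderedDict
-- from typing import Any
--
-- STANDARD_FIELDS = ["title", "date", "categories", "draft"]
--
-- def _ordered_front_matter(frontmatter: dict[str, Any]) -> OrderedDict[str, Any]:
--     ordered: OrderedDict[str, Any] = OrderedDict()
--     for field in STANDARD_FIELDS:
--         if field in frontmatter:
--             ordered[field] = frontmatter[field]
--     for key, value in frontmatter.items():
--         if key not in ordered:
--             ordered[key] = value
--     return ordered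
-- ===== SOURCE B (Python) =====
-- from collections import OrderedDict
-- from typing import Any
--
-- STANDARD_FIELDS = ["title", "date", "categories", "draft"]
--
-- def _ordered_front_matter(frontmatter: dict[str, Any]) -> OrderedDict[str, Any]:
--     n = len(STANDARD_FIELDS)
--     rank = {field: i for i, field in enumerate(STANDARD_FIELDS)}
--     buckets = [[] for _ in range(n + 1)]
--     for key, value in frontmatter.items():
--         buckets[rank.get(key, n)].append((key, value))
--     return OrderedDict(pair for bucket in buckets for pair in bucket)
-- ===== Notes on version B (the rewrite author's own statement) =====
-- stated objective: alternative
-- what changed: B replaces A's two loops (a membership-tested pass over STANDARD_FIELDS plus a second membership-tested pass over the items) by a single bucketing pass that drops each item into a bucket indexed by its rank (position in STANDARD_FIELDS, or last bucket for non-standard keys) and concatenates the buckets.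
import Mathlib
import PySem

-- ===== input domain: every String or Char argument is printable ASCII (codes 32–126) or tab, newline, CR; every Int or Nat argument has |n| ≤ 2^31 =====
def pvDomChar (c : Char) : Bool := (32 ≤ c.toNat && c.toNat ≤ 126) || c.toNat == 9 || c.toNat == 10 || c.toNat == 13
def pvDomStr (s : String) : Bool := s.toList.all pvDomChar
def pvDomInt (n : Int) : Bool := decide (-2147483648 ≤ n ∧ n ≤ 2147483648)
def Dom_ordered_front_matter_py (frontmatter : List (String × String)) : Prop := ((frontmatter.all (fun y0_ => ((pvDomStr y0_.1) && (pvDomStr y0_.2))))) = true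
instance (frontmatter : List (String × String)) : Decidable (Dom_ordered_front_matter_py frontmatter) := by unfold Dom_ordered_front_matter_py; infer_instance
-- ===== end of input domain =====

-- B replaces A's two membership-testing loops by one bucketing pass over the items keyed by rank (alternative decomposition, same cost).

-- ===== PORT A =====
def pvSF : List String := ["title", "date", "categories", "draft"]

def ordered_front_matter_py (frontmatter : List (String × String)) : List (String × String) :=
  let fm : PySem.Dict String String := ⟨frontmatter⟩
  let ordered : PySem.Dict String String :=
    pvSF.foldl (fun o field =>
      match fm.get? field with
      | some v => o.insert field v
      | none => o) ⟨[]⟩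
  let ordered2 : PySem.Dict String String :=
    frontmatter.foldl (fun o kv =>
      if (o.get? kv.1).isSome then o else o.insert kv.1 kv.2) ordered
  ordered2.items

-- ===== PORT B =====
def pvRank : PySem.Dict String Int := ⟨(PySem.List.enumerate pvSF).map (fun p => (p.2, p.1))⟩

def ordered_front_matter_py_alt (frontmatter : List (String × String)) : List (String × String) :=
  let n : Int := pvSF.length
  let buckets : List (List (String × String)) :=
    frontmatter.foldl
      (fun bs kv =>
        let r := ((pvRank.get? kv.1).getD n).toNat
        bs.set r ((bs.getD r []) ++ [kv]))
      (List.replicate (pvSF.length + 1) [])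
  buckets.flatten

-- ===== PRECONDITION & SPEC =====
-- Pre_ admits exactly the association lists that represent a Python dict: keys pairwise distinct
-- (a Python dict can never hold duplicate keys, so a list with duplicates encodes no input of A).
def Pre_ordered_front_matter_py (frontmatter : List (String × String)) : Prop :=
  (frontmatter.map Prod.fst).Nodup
instance (frontmatter : List (String × String)) : Decidable (Pre_ordered_front_matter_py frontmatter) := by
  unfold Pre_ordered_front_matter_py; infer_instance

def pvWitness_ordered_front_matter_py : (List (String × String)) :=
  [("author", "v"), ("title", "t"), ("draft", "true")]

def Spec_ordered_front_matter_py (frontmatter : List (String × String)) (out : List (String × String)) : Prop := out = ordered_front_matter_py_alt frontmatter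
instance (frontmatter : List (String × String)) (out : List (String × String)) : Decidable (Spec_ordered_front_matter_py frontmatter out) := by unfold Spec_ordered_front_matter_py; infer_instance

-- ===== CLAIM (what is proved, stated in full; the proofs are below) =====
def Claim_equal_ordered_front_matter_py : Prop := ∀ (frontmatter : List (String × String)), Dom_ordered_front_matter_py frontmatter → Pre_ordered_front_matter_py frontmatter → Spec_ordered_front_matter_py frontmatter (ordered_front_matter_py frontmatter)

-- ===== LEMMAS AND PROOFS =====

-- rank of a key: its position in pvSF, or 4 for non-standard keys
def rkOf (k : String) : Nat :=
  if k = "title" then 0 else if k = "date" then 1 else if k = "categories" then 2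
  else if k = "draft" then 3 else 4

theorem rank_get (k : String) : ((pvRank.get? k).getD (pvSF.length : Int)).toNat = rkOf k := by
  have hit : pvRank = ⟨[("title", (0 : Int)), ("date", 1), ("categories", 2), ("draft", 3)]⟩ := rfl
  rw [hit]
  unfold rkOf
  split_ifs with h0 h1 h2 h3
  · subst h0; rfl
  · subst h1; rfl
  · subst h2; rfl
  · subst h3; rfl
  · have e0 : ("title" == k) = false := beq_eq_false_iff_ne.mpr (Ne.symm h0)
    have e1 : ("date" == k) = false := beq_eq_false_iff_ne.mpr (Ne.symm h1)
    have e2 : ("categories" == k) = false := beq_eq_false_iff_ne.mpr (Ne.symm h2)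
    have e3 : ("draft" == k) = false := beq_eq_false_iff_ne.mpr (Ne.symm h3)
    simp [PySem.Dict.get?, List.find?, e0, e1, e2, e3, pvSF]

theorem rkOf_lt (k : String) : rkOf k < 5 := by unfold rkOf; split_ifs <;> omega

theorem rkOf_ne4_iff (k : String) : rkOf k ≠ 4 ↔ k ∈ pvSF := by
  unfold rkOf; split_ifs <;> simp_all [pvSF]

theorem rkOf_eq_iff0 (k : String) : (rkOf k = 0) ↔ k = "title" := by
  unfold rkOf; split_ifs <;> simp_all
theorem rkOf_eq_iff1 (k : String) : (rkOf k = 1) ↔ k = "date" := by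
  unfold rkOf; split_ifs <;> simp_all
theorem rkOf_eq_iff2 (k : String) : (rkOf k = 2) ↔ k = "categories" := by
  unfold rkOf; split_ifs <;> simp_all
theorem rkOf_eq_iff3 (k : String) : (rkOf k = 3) ↔ k = "draft" := by
  unfold rkOf; split_ifs <;> simp_all


-- ---- B side: the bucketing fold is a 5-way partition by rank ----
theorem bucket_loop (l : List (String × String)) (b0 b1 b2 b3 b4 : List (String × String)) :
    l.foldl
      (fun bs kv => bs.set (rkOf kv.1) ((bs.getD (rkOf kv.1) []) ++ [kv]))
      [b0, b1, b2, b3, b4]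
    = [b0 ++ l.filter (fun kv => rkOf kv.1 == 0),
       b1 ++ l.filter (fun kv => rkOf kv.1 == 1),
       b2 ++ l.filter (fun kv => rkOf kv.1 == 2),
       b3 ++ l.filter (fun kv => rkOf kv.1 == 3),
       b4 ++ l.filter (fun kv => rkOf kv.1 == 4)] := by
  induction l generalizing b0 b1 b2 b3 b4 with
  | nil => simp
  | cons kv l ih =>
    simp only [List.foldl_cons]
    have h5 := rkOf_lt kv.1
    interval_cases h : rkOf kv.1
    · rw [show [b0, b1, b2, b3, b4].set 0 ([b0, b1, b2, b3, b4].getD 0 [] ++ [kv])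
          = [b0 ++ [kv], b1, b2, b3, b4] from rfl, ih]
      simp [h, List.append_assoc]
    · rw [show [b0, b1, b2, b3, b4].set 1 ([b0, b1, b2, b3, b4].getD 1 [] ++ [kv])
          = [b0, b1 ++ [kv], b2, b3, b4] from rfl, ih]
      simp [h, List.append_assoc]
    · rw [show [b0, b1, b2, b3, b4].set 2 ([b0, b1, b2, b3, b4].getD 2 [] ++ [kv])
          = [b0, b1, b2 ++ [kv], b3, b4] from rfl, ih]
      simp [h, List.append_assoc]
    · rw [show [b0, b1, b2, b3, b4].set 3 ([b0, b1, b2, b3, b4].getD 3 [] ++ [kv])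
          = [b0, b1, b2, b3 ++ [kv], b4] from rfl, ih]
      simp [h, List.append_assoc]
    · rw [show [b0, b1, b2, b3, b4].set 4 ([b0, b1, b2, b3, b4].getD 4 [] ++ [kv])
          = [b0, b1, b2, b3, b4 ++ [kv]] from rfl, ih]
      simp [h, List.append_assoc]

def canon (l : List (String × String)) : List (String × String) :=
  l.filter (fun kv => rkOf kv.1 == 0) ++ l.filter (fun kv => rkOf kv.1 == 1) ++
  l.filter (fun kv => rkOf kv.1 == 2) ++ l.filter (fun kv => rkOf kv.1 == 3) ++
  l.filter (fun kv => rkOf kv.1 == 4)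

theorem alt_eq_canon (fm : List (String × String)) :
    ordered_front_matter_py_alt fm = canon fm := by
  unfold ordered_front_matter_py_alt canon
  have hf : (fun (bs : List (List (String × String))) (kv : String × String) =>
        let r := ((pvRank.get? kv.1).getD ((pvSF.length : Int))).toNat
        bs.set r ((bs.getD r []) ++ [kv]))
      = (fun bs kv => bs.set (rkOf kv.1) ((bs.getD (rkOf kv.1) []) ++ [kv])) := by
    funext bs kv; simp [rank_get]
  simp only [hf]
  rw [show (List.replicate (pvSF.length + 1) ([] : List (String × String))) = [[], [], [], [], []] from by simp [pvSF]]
  rw [bucket_loop]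
  simp [List.flatten]

-- ---- A side ----
def optPair (f : String) (o : Option String) : List (String × String) :=
  match o with | some v => [(f, v)] | none => []

-- first loop of A: inserting the present standard fields appends them in order
theorem loop1 (fm : List (String × String)) (fields : List String)
    (o : PySem.Dict String String) (hnd : fields.Nodup)
    (hdisj : ∀ f ∈ fields, o.contains f = false) :
    (fields.foldl (fun o field =>
      match (PySem.Dict.mk fm).get? field with
      | some v => o.insert field v
      | none => o) o).items
    = o.items ++ fields.flatMap (fun f => optPair f ((PySem.Dict.mk fm).get? f)) := by
  induction fields generalizing o with
  | nil => simp
  | cons f fields ih =>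
    simp only [List.foldl_cons, List.flatMap_cons]
    rcases hg : (PySem.Dict.mk fm).get? f with _ | v
    · rw [ih _ hnd.of_cons (fun g hg => hdisj g (List.mem_cons_of_mem _ hg))]
      simp [optPair]
    · have hc : o.contains f = false := hdisj f (List.mem_cons_self ..)
      have hins : (o.insert f v).items = o.items ++ [(f, v)] := by
        simp [PySem.Dict.insert, hc]
      have hdisj' : ∀ g ∈ fields, (o.insert f v).contains g = false := by
        intro g hgm
        have hne : g ≠ f := by
          intro h; exact (List.nodup_cons.mp hnd).1 (h ▸ hgm)
        have hcg : (o.items.any fun p => p.1 == g) = false := hdisj g (List.mem_cons_of_mem _ hgm)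
        simp only [PySem.Dict.contains]
        rw [hins, List.any_append]
        simp [hcg, beq_eq_false_iff_ne.mpr (Ne.symm hne)]
      rw [ih _ hnd.of_cons hdisj', hins]
      simp [optPair]

-- second loop of A: appends exactly the non-standard pairs, given distinct keys
theorem loop2 (l : List (String × String)) (o : PySem.Dict String String)
    (hnd : (l.map Prod.fst).Nodup)
    (hiff : ∀ kv ∈ l, ((o.get? kv.1).isSome ↔ rkOf kv.1 ≠ 4)) :
    (l.foldl (fun o kv =>
      if (o.get? kv.1).isSome then o else o.insert kv.1 kv.2) o).items
    = o.items ++ l.filter (fun kv => rkOf kv.1 == 4) := by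
  induction l generalizing o with
  | nil => simp
  | cons kv l ih =>
    simp only [List.foldl_cons, List.filter_cons]
    by_cases hs : ((o.get? kv.1).isSome : Prop)
    · have hk : rkOf kv.1 ≠ 4 := (hiff kv (List.mem_cons_self ..)).mp hs
      rw [if_pos hs, ih _ (List.nodup_cons.mp hnd).2
        (fun kv' h => hiff kv' (List.mem_cons_of_mem _ h))]
      simp [hk]
    · have hk : rkOf kv.1 = 4 := by
        by_contra h; exact hs ((hiff kv (List.mem_cons_self ..)).mpr h)
      have hc : o.contains kv.1 = false := by
        rw [← Bool.not_eq_true]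
        intro hct
        apply hs
        rcases List.any_eq_true.mp hct with ⟨p, hp, hpe⟩
        have hfind : (List.find? (fun p => p.1 == kv.1) o.items).isSome :=
          List.find?_isSome.mpr ⟨p, hp, hpe⟩
        simpa [PySem.Dict.get?] using hfind
      have hins : (o.insert kv.1 kv.2).items = o.items ++ [(kv.1, kv.2)] := by
        simp [PySem.Dict.insert, hc]
      have hiff' : ∀ kv' ∈ l, (((o.insert kv.1 kv.2).get? kv'.1).isSome ↔ rkOf kv'.1 ≠ 4) := by
        intro kv' h
        have hne : kv'.1 ≠ kv.1 := by
          intro he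
          exact (List.nodup_cons.mp hnd).1 (he ▸ List.mem_map_of_mem h)
        simp only [PySem.Dict.get?, hins, List.find?_append]
        rw [show (List.find? (fun p => p.1 == kv'.1) [(kv.1, kv.2)]) = none by simp [hne.symm]]
        simpa [PySem.Dict.get?] using hiff kv' (List.mem_cons_of_mem _ h)
      rw [if_neg hs, ih _ (List.nodup_cons.mp hnd).2 hiff', hins]
      simp [hk]

-- with distinct keys the first-match lookup is the filter by that key
theorem filter_key_eq (fm : List (String × String)) (hnd : (fm.map Prod.fst).Nodup)
    (f : String) :
    fm.filter (fun kv => kv.1 == f) = optPair f ((PySem.Dict.mk fm).get? f) := by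
  induction fm with
  | nil => simp [optPair, PySem.Dict.get?]
  | cons kv l ih =>
    obtain ⟨k, v⟩ := kv
    have hnotin : k ∉ l.map Prod.fst := (List.nodup_cons.mp (by simpa using hnd)).1
    by_cases h : k = f
    · subst h
      have hf : l.filter (fun kv' => kv'.1 == k) = [] := by
        rw [List.filter_eq_nil_iff]
        intro kv' h'
        simp only [beq_iff_eq]
        intro he
        exact hnotin (he ▸ List.mem_map_of_mem h')
      simp [PySem.Dict.get?, List.find?, optPair, hf]
    · rw [List.filter_cons, if_neg (by simp [h])]
      rw [ih (List.nodup_cons.mp (by simpa using hnd)).2]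
      simp [PySem.Dict.get?, List.find?, show (k == f) = false by simp [h]]

theorem mem_flatMap_optPair (fm : List (String × String)) (k : String) :
    (List.find? (fun p => p.1 == k)
      (pvSF.flatMap (fun f => optPair f ((PySem.Dict.mk fm).get? f)))).isSome
    ↔ k ∈ pvSF ∧ (((PySem.Dict.mk fm).get? k).isSome : Prop) := by
  rw [List.find?_isSome]
  constructor
  · rintro ⟨p, hp, hpk⟩
    rcases List.mem_flatMap.mp hp with ⟨f, hf, hpf⟩
    have hk : p.1 = k := by simpa using hpk
    rcases hg : (PySem.Dict.mk fm).get? f with _ | v <;> simp [optPair, hg] at hpf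
    have : p = (f, v) := hpf
    subst this
    simp only at hk
    subst hk
    exact ⟨hf, by simp [hg]⟩
  · rintro ⟨hmem, hsome⟩
    rcases Option.isSome_iff_exists.mp hsome with ⟨v, hv⟩
    exact ⟨(k, v), List.mem_flatMap.mpr ⟨k, hmem, by simp [optPair, hv]⟩, by simp⟩

theorem get?_isSome_find (d : PySem.Dict String String) (k : String) :
    (((d.get? k).isSome : Bool) : Prop) ↔ (((List.find? (fun p => p.1 == k) d.items).isSome : Bool) : Prop) := by
  simp [PySem.Dict.get?]

-- ===== VERDICT (by name: the statement is the Claim_ definition above) =====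
theorem ordered_front_matter_py_spec : Claim_equal_ordered_front_matter_py := by
  intro fm _ hpre
  unfold Spec_ordered_front_matter_py
  rw [alt_eq_canon]
  unfold ordered_front_matter_py
  have hitems := loop1 fm pvSF ⟨[]⟩ (by decide) (fun f _ => rfl)
  rw [loop2 fm _ hpre ?_]
  · rw [hitems]
    unfold canon
    have h0 := filter_key_eq fm hpre "title"
    have h1 := filter_key_eq fm hpre "date"
    have h2 := filter_key_eq fm hpre "categories"
    have h3 := filter_key_eq fm hpre "draft"
    have e0 : fm.filter (fun kv => rkOf kv.1 == 0) = fm.filter (fun kv => kv.1 == "title") :=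
      List.filter_congr (by intro kv _; simp [rkOf_eq_iff0])
    have e1 : fm.filter (fun kv => rkOf kv.1 == 1) = fm.filter (fun kv => kv.1 == "date") :=
      List.filter_congr (by intro kv _; simp [rkOf_eq_iff1])
    have e2 : fm.filter (fun kv => rkOf kv.1 == 2) = fm.filter (fun kv => kv.1 == "categories") :=
      List.filter_congr (by intro kv _; simp [rkOf_eq_iff2])
    have e3 : fm.filter (fun kv => rkOf kv.1 == 3) = fm.filter (fun kv => kv.1 == "draft") :=
      List.filter_congr (by intro kv _; simp [rkOf_eq_iff3])
    rw [e0, e1, e2, e3, h0, h1, h2, h3]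
    simp [pvSF, List.flatMap, List.append_assoc]
  · -- the dict built by loop 1 contains k iff k is standard (for keys present in fm)
    intro kv hkv
    rw [get?_isSome_find, hitems, List.nil_append, mem_flatMap_optPair]
    have hpresent : (((PySem.Dict.mk fm).get? kv.1).isSome : Prop) := by
      simp only [PySem.Dict.get?, Option.isSome_map]
      exact List.find?_isSome.mpr ⟨kv, hkv, by simp⟩
    rw [← rkOf_ne4_iff]
    tauto
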